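-- pv_equiv track=rewrite | github.com/aujbl/vehiclespeed | Detector.py | bounds_filter
-- ===== SOURCE A (Python) =====
-- def bounds_filter(bounds, min_area=50):
--     # 去掉面积较小的区域
--     bounds = [bound for bound in bounds if bound[2]*bound[3] > min_area]
--     # 根据矩形框面积进行排序
--     bounds.sort(key=lambda bound: bound[2]*bound[3], reverse=True)
--     i = 0
--     while i < len(bounds):
--         x1, y1, w1, h1 = bounds[i]
--         new_bounds = []
--         for bound in bounds[i+1:]:
--             x2, y2, w2, h2 = bound
--             if not (x1 <= x2 <= x1+w1 and y1 <= y2 <= y1+h1):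
--                 new_bounds.append(bound)
--         i += 1
--         bounds = bounds[:i]+new_bounds
--     return bounds
-- ===== SOURCE B (Python) =====
-- def bounds_filter(bounds, min_area=50):
--     boxes = sorted((b for b in bounds if b[2] * b[3] > min_area),
--                    key=lambda b: b[2] * b[3], reverse=True)
--     kept = []
--     for x2, y2, w2, h2 in boxes:
--         if not any(x1 <= x2 <= x1 + w1 and y1 <= y2 <= y1 + h1
--                    for x1, y1, w1, h1 in kept):
--             kept.append((x2, y2, w2, h2))
--     return kept
-- ===== Notes on version B (the rewrite author's own statement) =====
-- stated objective: simpler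
-- what changed: Replaces A's while-loop that repeatedly rebuilds the remaining list (bounds[:i] + filtered tail) with a single accumulator pass that appends a box only if its top-left corner lies in no already-kept box.
import Mathlib
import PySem

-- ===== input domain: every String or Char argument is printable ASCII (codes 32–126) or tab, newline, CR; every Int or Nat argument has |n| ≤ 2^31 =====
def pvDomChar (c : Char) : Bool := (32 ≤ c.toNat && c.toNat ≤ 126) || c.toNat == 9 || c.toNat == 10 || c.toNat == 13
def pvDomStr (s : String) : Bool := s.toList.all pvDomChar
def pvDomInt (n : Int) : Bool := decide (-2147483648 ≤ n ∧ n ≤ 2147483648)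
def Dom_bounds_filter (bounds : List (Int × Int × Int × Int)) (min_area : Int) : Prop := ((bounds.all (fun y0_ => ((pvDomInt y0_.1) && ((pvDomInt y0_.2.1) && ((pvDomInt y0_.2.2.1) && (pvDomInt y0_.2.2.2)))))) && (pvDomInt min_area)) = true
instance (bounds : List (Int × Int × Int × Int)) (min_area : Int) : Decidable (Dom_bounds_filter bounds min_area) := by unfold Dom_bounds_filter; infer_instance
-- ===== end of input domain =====

-- B replaces A's while-loop that repeatedly rebuilds the remaining list with a single
-- accumulator pass over the sorted boxes (simpler decomposition, same O(n^2) cost).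


-- ===== PORT A =====
-- the inline corner-containment test 'x1 <= x2 <= x1+w1 and y1 <= y2 <= y1+h1'
def pvCornerIn (a c : Int × Int × Int × Int) : Bool :=
  decide (a.1 ≤ c.1 ∧ c.1 ≤ a.1 + a.2.2.1 ∧ a.2.1 ≤ c.2.1 ∧ c.2.1 ≤ a.2.1 + a.2.2.2)

-- A's while loop: bounds = done ++ todo, i = done.length; each step keeps bounds[i]
-- and rebuilds the tail as the filtered new_bounds
def bounds_filter_loop (done todo : List (Int × Int × Int × Int)) :
    List (Int × Int × Int × Int) :=
  match todo with
  | [] => done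
  | b :: rest => bounds_filter_loop (done ++ [b]) (rest.filter (fun c => !(pvCornerIn b c)))
termination_by todo.length
decreasing_by
  have h1 := List.length_filter_le (fun x => !pvCornerIn b x.1) rest.attach
  simp at h1 ⊢
  omega

def bounds_filter (bounds : List (Int × Int × Int × Int)) (min_area : Int) :
    List (Int × Int × Int × Int) :=
  bounds_filter_loop []
    (PySem.List.sorted (bounds.filter (fun b => decide (b.2.2.1 * b.2.2.2 > min_area)))
      (fun b => b.2.2.1 * b.2.2.2) true)

-- ===== PORT B =====
-- B's accumulator step: append b unless its corner lies in an already-kept box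
def bounds_filter_step (kept : List (Int × Int × Int × Int)) (b : Int × Int × Int × Int) :
    List (Int × Int × Int × Int) :=
  if kept.any (fun a => pvCornerIn a b) then kept else kept ++ [b]

def bounds_filter_alt (bounds : List (Int × Int × Int × Int)) (min_area : Int) :
    List (Int × Int × Int × Int) :=
  (PySem.List.sorted (bounds.filter (fun b => decide (b.2.2.1 * b.2.2.2 > min_area)))
      (fun b => b.2.2.1 * b.2.2.2) true).foldl bounds_filter_step []

-- ===== PRECONDITION & SPEC =====
def Spec_bounds_filter (bounds : List (Int × Int × Int × Int)) (min_area : Int) (out : List (Int × Int × Int × Int)) : Prop := out = bounds_filter_alt bounds min_area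
instance (bounds : List (Int × Int × Int × Int)) (min_area : Int) (out : List (Int × Int × Int × Int)) : Decidable (Spec_bounds_filter bounds min_area out) := by unfold Spec_bounds_filter; infer_instance

-- ===== CLAIM (what is proved, stated in full; the proofs are below) =====
def Claim_equal_bounds_filter : Prop := ∀ (bounds : List (Int × Int × Int × Int)) (min_area : Int), Dom_bounds_filter bounds min_area → Spec_bounds_filter bounds min_area (bounds_filter bounds min_area)

-- ===== LEMMAS AND PROOFS =====

-- once b is kept, B's fold silently skips every box whose corner is inside b,
-- so pre-filtering those boxes away does not change the fold
theorem foldl_step_filter (b : Int × Int × Int × Int)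
    (rest kept : List (Int × Int × Int × Int)) (hb : b ∈ kept) :
    List.foldl bounds_filter_step kept rest
      = List.foldl bounds_filter_step kept (rest.filter (fun c => !(pvCornerIn b c))) := by
  induction rest generalizing kept with
  | nil => rfl
  | cons c rest ih =>
    by_cases h : pvCornerIn b c = true
    · have hany : kept.any (fun a => pvCornerIn a c) = true :=
        List.any_eq_true.mpr ⟨b, hb, h⟩
      simp [h, List.foldl_cons, bounds_filter_step, hany]
      exact ih kept hb
    · have h' : pvCornerIn b c = false := by simpa using h
      simp only [List.filter_cons, h', Bool.not_false, List.foldl_cons]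
      apply ih
      unfold bounds_filter_step
      split
      · exact hb
      · exact List.mem_append_left _ hb

-- A's shrinking-list loop equals B's fold whenever no pending box's corner
-- lies in an already-kept box
theorem loop_eq_foldl_aux (n : Nat) : ∀ (done todo : List (Int × Int × Int × Int)),
    todo.length ≤ n →
    (∀ c ∈ todo, ∀ a ∈ done, pvCornerIn a c = false) →
    bounds_filter_loop done todo = List.foldl bounds_filter_step done todo := by
  induction n with
  | zero =>
    intro done todo hlen _
    have : todo = [] := List.eq_nil_of_length_eq_zero (Nat.le_zero.mp hlen)
    subst this; rw [bounds_filter_loop]; rfl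
  | succ n ihn =>
    intro done todo hlen hinv
    match todo with
    | [] => rw [bounds_filter_loop]; rfl
    | b :: rest =>
    have ih := ihn (done ++ [b]) (rest.filter (fun c => !(pvCornerIn b c)))
      (le_trans (List.length_filter_le _ _) (by simpa using Nat.lt_succ_iff.mp (lt_of_lt_of_le (by simp) hlen)))
    have hb : ∀ a ∈ done, pvCornerIn a b = false := hinv b (by simp)
    have hany : done.any (fun a => pvCornerIn a b) = false := by
      simp only [List.any_eq_false]
      intro a ha; simp [hb a ha]
    rw [bounds_filter_loop, List.foldl_cons]
    have hstep : bounds_filter_step done b = done ++ [b] := by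
      simp [bounds_filter_step, hany]
    rw [hstep, ih ?_, ← foldl_step_filter b rest (done ++ [b]) (by simp)]
    intro c hc a ha
    have hc' := List.of_mem_filter hc
    have hcr := List.mem_of_mem_filter hc
    rcases List.mem_append.mp ha with ha | ha
    · exact hinv c (by simp [hcr]) a ha
    · simp only [List.mem_singleton] at ha
      subst ha; simpa using hc'

-- ===== VERDICT (by name: the statement is the Claim_ definition above) =====
theorem bounds_filter_spec : Claim_equal_bounds_filter := by
  intro bounds min_area _
  unfold Spec_bounds_filter bounds_filter bounds_filter_alt
  exact loop_eq_foldl_aux _ _ _ le_rfl (by intro c _ a ha; cases ha)
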